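-- pv_equiv track=rewrite | github.com/Jonathana1106/PythonITP | Quices/JonathanGuzmanAraya#3.py | aux
-- ===== SOURCE A (Python) =====
-- def aux(lista, n, m, h): # Se crea la funcion auxiliar
--     if n == (len(lista)-1): # 'Se corrigio al agregar un -1 al final'# Condicion de parada
--         return False # Retorna resultado Falso
--     elif (lista[n] + h) == lista[m]: # Condicion de validacion
--         return True # Si se cumple retorna Verdadero
--     else:
--         h = h + lista[n] # Asignacion de valor
--         return aux(lista, n+1, m+1, h) # Llamada recursiva
-- ===== SOURCE B (Python) =====
-- def aux(lista, n, m, h):  # iterative: offset counter k and a running prefix total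
--     total = h
--     k = 0
--     while n + k != len(lista) - 1:
--         total += lista[n + k]
--         if total == lista[m + k]:
--             return True
--         k += 1
--     return False
-- ===== Notes on version B (the rewrite author's own statement) =====
-- stated objective: idiomatic
-- what changed: A's tail recursion over shifting parameters (n, m, h) is replaced by an iterative while-loop that keeps n and m fixed and advances an offset counter k with a running prefix total, a different decomposition of the same linear scan.
import Mathlib
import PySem

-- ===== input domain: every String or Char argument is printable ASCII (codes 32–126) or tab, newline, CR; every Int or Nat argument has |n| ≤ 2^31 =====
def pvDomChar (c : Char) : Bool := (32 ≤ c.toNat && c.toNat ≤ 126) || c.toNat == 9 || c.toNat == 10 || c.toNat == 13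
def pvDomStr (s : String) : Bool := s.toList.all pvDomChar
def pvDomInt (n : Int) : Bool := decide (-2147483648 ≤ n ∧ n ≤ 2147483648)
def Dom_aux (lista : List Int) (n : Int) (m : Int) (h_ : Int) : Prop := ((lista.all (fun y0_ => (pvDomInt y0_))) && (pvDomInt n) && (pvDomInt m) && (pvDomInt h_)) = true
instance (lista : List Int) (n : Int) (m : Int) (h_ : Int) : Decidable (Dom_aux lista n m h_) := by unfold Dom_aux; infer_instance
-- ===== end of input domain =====

-- B replaces A's recursion with an iterative while-loop over an offset counter k keeping a running prefix total (idiomatic decomposition, same cost).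


-- ===== PORT A =====
-- literal transliteration of A's recursion; pyGet? none = Python IndexError (excluded by Pre_aux)
def aux (lista : List Int) (n : Int) (m : Int) (h_ : Int) : Bool :=
  if n = (lista.length : Int) - 1 then false
  else
    match hn : PySem.List.pyGet? lista n, PySem.List.pyGet? lista m with
    | some a, some b =>
      if a + h_ = b then true
      else aux lista (n + 1) (m + 1) (h_ + a)
    | _, _ => false  -- IndexError in Python; unreachable under Pre_aux
termination_by ((lista.length : Int) - n).toNat
decreasing_by
  have h2 : ¬ (PySem.List.pyGet? lista n = none) := by simp [hn]
  rw [PySem.List.pyGet?_eq_none_iff, not_not] at h2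
  unfold PySem.Raise.InRange at h2
  omega

-- ===== PORT B =====
-- B's 'while n + k != len(lista) - 1' loop: state = (k, total)
def auxAltGo (lista : List Int) (n : Int) (m : Int) (k : Int) (total : Int) : Bool :=
  if n + k = (lista.length : Int) - 1 then false
  else
    match hk : PySem.List.pyGet? lista (n + k) with
    | none => false  -- IndexError in Python; unreachable under Pre_aux
    | some a =>
      match PySem.List.pyGet? lista (m + k) with
      | none => false  -- IndexError in Python; unreachable under Pre_aux
      | some b =>
        if total + a = b then true
        else auxAltGo lista n m (k + 1) (total + a)
termination_by ((lista.length : Int) - (n + k)).toNat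
decreasing_by
  have h2 : ¬ (PySem.List.pyGet? lista (n + k) = none) := by simp [hk]
  rw [PySem.List.pyGet?_eq_none_iff, not_not] at h2
  unfold PySem.Raise.InRange at h2
  omega

def aux_alt (lista : List Int) (n : Int) (m : Int) (h_ : Int) : Bool :=
  auxAltGo lista n m 0 h_

-- ===== PRECONDITION & SPEC =====
-- Pre_aux admits exactly the inputs on which Python A returns (B raises on the very same inputs):
-- the immediate stop n = len-1; fully in-range runs (m ≤ n+1); and runs where the prefix-sum
-- match h + lista[n] + … + lista[n+i] = lista[m+i] fires at some offset i before the first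
-- out-of-range access lista[m + (len - m)]. Everything excluded raises IndexError in both A and B.
def Pre_aux (lista : List Int) (n : Int) (m : Int) (h_ : Int) : Prop :=
  n = (lista.length : Int) - 1 ∨
    (-(lista.length : Int) ≤ n ∧ n < (lista.length : Int) - 1 ∧
     -(lista.length : Int) ≤ m ∧
     (m ≤ n + 1 ∨
      ∃ i ∈ List.range ((lista.length : Int) - m).toNat,
        h_ + (((List.range (i + 1)).map
          (fun j => (PySem.List.pyGet? lista (n + (j : Int))).getD 0)).sum)
          = (PySem.List.pyGet? lista (m + (i : Int))).getD 0))
instance (lista : List Int) (n : Int) (m : Int) (h_ : Int) : Decidable (Pre_aux lista n m h_) := by unfold Pre_aux; infer_instance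
def pvWitness_aux : List Int × Int × Int × Int := ([1, 2, 3], 0, 1, 0)

def Spec_aux (lista : List Int) (n : Int) (m : Int) (h_ : Int) (out : Bool) : Prop := out = aux_alt lista n m h_
instance (lista : List Int) (n : Int) (m : Int) (h_ : Int) (out : Bool) : Decidable (Spec_aux lista n m h_ out) := by unfold Spec_aux; infer_instance

-- ===== CLAIM (what is proved, stated in full; the proofs are below) =====
def Claim_equal_aux : Prop := ∀ (lista : List Int) (n : Int) (m : Int) (h_ : Int), Dom_aux lista n m h_ → Pre_aux lista n m h_ → Spec_aux lista n m h_ (aux lista n m h_)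

-- ===== LEMMAS AND PROOFS =====

-- B's loop, started at offset k, computes A's recursion from position (n+k, m+k) — on EVERY input
-- (both ports return false at the step where Python would raise, so no range hypotheses are needed).
lemma go_eq_aux : ∀ (t : Nat) (lista : List Int) (n m total k : Int),
    ((lista.length : Int) - 1 - (n + k)).toNat ≤ t →
    auxAltGo lista n m k total = aux lista (n + k) (m + k) total := by
  intro t
  induction t with
  | zero =>
    intro lista n m total k ht
    by_cases hstop : n + k = (lista.length : Int) - 1
    · unfold auxAltGo aux
      rw [if_pos hstop, if_pos hstop]
    · have hgt : (lista.length : Int) ≤ n + k := by omega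
      have hnone : PySem.List.pyGet? lista (n + k) = none := by
        rw [PySem.List.pyGet?_eq_none_iff]
        unfold PySem.Raise.InRange
        omega
      unfold auxAltGo aux
      rw [if_neg hstop, if_neg hstop, hnone]
  | succ t ih =>
    intro lista n m total k ht
    by_cases hstop : n + k = (lista.length : Int) - 1
    · unfold auxAltGo aux
      rw [if_pos hstop, if_pos hstop]
    · unfold auxAltGo
      conv_rhs => rw [aux]
      rw [if_neg hstop, if_neg hstop]
      cases ha : PySem.List.pyGet? lista (n + k) with
      | none => rfl
      | some a =>
        cases hb : PySem.List.pyGet? lista (m + k) with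
        | none => rfl
        | some b =>
          dsimp only
          by_cases hc : total + a = b
          · rw [if_pos hc, if_pos (by omega)]
          · rw [if_neg hc, if_neg (by omega)]
            have := ih lista n m (total + a) (k + 1) (by omega)
            rw [this]
            have e1 : n + k + 1 = n + (k + 1) := by ring
            have e2 : m + k + 1 = m + (k + 1) := by ring
            rw [e1, e2]

-- ===== VERDICT (by name: the statement is the Claim_ definition above) =====
theorem aux_spec : Claim_equal_aux := by
  intro lista n m h_ _ _
  unfold Spec_aux aux_alt
  have := go_eq_aux ((lista.length : Int) - 1 - (n + 0)).toNat lista n m h_ 0 (le_refl _)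
  simp only [add_zero] at this
  exact this.symm
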